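-- pv_equiv track=rewrite | github.com/fjeos/Algorithm | 프로그래머스/2/76502. 괄호 회전하기/괄호 회전하기.py | solution
-- ===== SOURCE A (Python) =====
-- def solution(s):
--     answer = 0
--     n = len(s)
--     string = list(s)
--     for _ in range(n):
--         stack = []
--         for i in range(n):
--             symbol = string[i]
--             if symbol == '(' or symbol == '{' or symbol == '[':
--                 stack.append(symbol)
--
--             elif stack and ((symbol == ')' and stack[-1] == '(') or
--             (symbol == '}' and stack[-1] == '{') or
--             (symbol == ']' and stack[-1] == '[')):
--                 stack.pop()
--
--             else:
--                 stack.append(symbol)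
--         if not stack:
--             answer += 1
--
--         string.append(string.pop(0))
--     return answer
-- ===== SOURCE B (Python) =====
-- def solution(s):
--     n = len(s)
--     answer = 0
--     for r in range(n):
--         t = s[r:] + s[:r]
--         while True:
--             u = t.replace('()', '').replace('{}', '').replace('[]', '')
--             if u == t:
--                 break
--             t = u
--         if t == '':
--             answer += 1
--     return answer
-- ===== Notes on version B (the rewrite author's own statement) =====
-- stated objective: idiomatic
-- what changed: Each rotation is produced by slicing instead of repeatedly mutating a list, and validity is tested by deleting adjacent matching bracket pairs with str.replace until a fixpoint and checking emptiness, instead of a hand-written stack scan.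
import Mathlib
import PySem

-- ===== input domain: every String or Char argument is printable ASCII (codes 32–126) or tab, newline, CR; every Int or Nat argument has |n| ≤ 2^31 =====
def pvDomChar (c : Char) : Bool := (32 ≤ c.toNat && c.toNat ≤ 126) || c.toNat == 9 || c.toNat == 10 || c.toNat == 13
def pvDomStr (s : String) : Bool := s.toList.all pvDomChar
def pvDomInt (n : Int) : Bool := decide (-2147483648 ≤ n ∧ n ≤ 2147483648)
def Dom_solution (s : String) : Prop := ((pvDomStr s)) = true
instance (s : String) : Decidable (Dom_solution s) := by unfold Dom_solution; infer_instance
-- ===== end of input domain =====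

-- B produces each rotation by slicing (s[r:] + s[:r]) instead of rotating a mutable list, and tests
-- validity by reducing the rotation to a fixpoint with the three pair-replaces and checking emptiness,
-- instead of A's hand-written stack scan; same value, idiomatic restructuring.

-- ===== PORT A =====
-- one step of A's inner loop: push openers; pop on a matching closer; push anything else
def stepA (stack : List Char) (symbol : Char) : List Char :=
  if symbol = '(' ∨ symbol = '{' ∨ symbol = '[' then
    symbol :: stack
  else
    match stack with
    | top :: rest =>
        if (symbol = ')' ∧ top = '(') ∨ (symbol = '}' ∧ top = '{') ∨ (symbol = ']' ∧ top = '[') then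
          rest
        else symbol :: stack
    | [] => symbol :: stack


def solution (s : String) : Int :=
  let n := s.toList.length
  -- for _ in range(n), state (answer, string)
  (((PySem.List.pyRange 0 (n : Int) 1).foldl (fun (st : Int × List Char) _ =>
      let string := st.2
      -- for i in range(n): symbol = string[i]; … (string always has length n, so indexing never raises)
      let stack := (PySem.List.pyRange 0 (n : Int) 1).foldl
        (fun stack i => stepA stack (PySem.List.pyGetD string i ' ')) []
      let answer := if stack = [] then st.1 + 1 else st.1
      -- string.append(string.pop(0)); the 'none' arm is unreachable (string is nonempty inside the loop)
      let string' := match PySem.List.pop? string 0 with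
        | some (v, rest) => rest ++ [v]
        | none => string
      (answer, string')) ((0 : Int), s.toList)).1)

-- ===== PORT B =====
-- one pass: t.replace('()','').replace('{}','').replace('[]','')
def reduceStep (t : List Char) : List Char :=
  PySem.Chars.replace (PySem.Chars.replace (PySem.Chars.replace t ['(', ')'] []) ['{', '}'] []) ['[', ']'] []

-- the 'while True' loop; the fuel only makes it total (t.length + 1 suffices: every effective pass shortens t)
def reduceLoop : Nat → List Char → List Char
  | 0, t => t
  | fuel + 1, t =>
      let u := reduceStep t
      if u = t then t else reduceLoop fuel u

def solution_alt (s : String) : Int :=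
  let n := s.toList.length
  (PySem.List.pyRange 0 (n : Int) 1).foldl (fun (answer : Int) r =>
      let t := PySem.List.slice s.toList (some r) none ++ PySem.List.slice s.toList none (some r)
      if reduceLoop (t.length + 1) t = [] then answer + 1 else answer) 0

-- ===== PRECONDITION & SPEC =====
def Spec_solution (s : String) (out : Int) : Prop := out = solution_alt s
instance (s : String) (out : Int) : Decidable (Spec_solution s out) := by unfold Spec_solution; infer_instance

-- ===== CLAIM (what is proved, stated in full; the proofs are below) =====
def Claim_equal_solution : Prop := ∀ (s : String), Dom_solution s → Spec_solution s (solution s)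

-- ===== LEMMAS AND PROOFS =====

def pairOK (o c : Char) : Prop := (o = '(' ∧ c = ')') ∨ (o = '{' ∧ c = '}') ∨ (o = '[' ∧ c = ']')

def myDel (o c : Char) : List Char → List Char
  | [] => []
  | [a] => [a]
  | a :: b :: r => if a = o ∧ b = c then myDel o c r else a :: myDel o c (b :: r)

theorem replace_go_eq (o c : Char) : ∀ (fuel : Nat) (l acc : List Char), l.length ≤ fuel →
    PySem.Chars.replace.go [o, c] [] fuel l acc = acc.reverse ++ myDel o c l := by
  intro fuel
  induction fuel with
  | zero =>
      intro l acc h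
      have : l = [] := List.length_eq_zero_iff.mp (Nat.le_zero.mp h)
      subst this
      simp [PySem.Chars.replace.go, myDel]
  | succ k ih =>
      intro l acc h
      match l with
      | [] => simp [PySem.Chars.replace.go, myDel]
      | [a] =>
          have hpre : ([o, c].isPrefixOf [a]) = false := by
            simp [List.isPrefixOf]
          simp only [PySem.Chars.replace.go, hpre]
          rw [ih [] (a :: acc) (by simp)]
          simp [myDel]
      | a :: b :: r =>
          by_cases hab : a = o ∧ b = c
          · obtain ⟨ha, hb⟩ := hab; subst ha; subst hb
            have hpre : ([a, b].isPrefixOf (a :: b :: r)) = true := by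
              simp [List.isPrefixOf]
            simp only [PySem.Chars.replace.go, hpre, if_true, List.length_cons,
              List.length_nil, List.drop_succ_cons, List.drop_zero, List.reverse_nil,
              List.nil_append]
            rw [ih r acc (by simp at h ⊢; omega)]
            simp [myDel]
          · have hpre : ([o, c].isPrefixOf (a :: b :: r)) = false := by
              simp [List.isPrefixOf]
              intro ho hc; exact hab ⟨ho.symm, hc.symm⟩
            simp only [PySem.Chars.replace.go, hpre]
            rw [ih (b :: r) (a :: acc) (by simp at h ⊢; omega)]
            simp [myDel, hab]

theorem replace_eq_myDel (o c : Char) (l : List Char) :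
    PySem.Chars.replace l [o, c] [] = myDel o c l := by
  rw [PySem.Chars.replace]
  simp only [List.isEmpty_cons, if_false]
  rw [replace_go_eq o c l.length l [] le_rfl]
  simp

theorem length_myDel_le (o c : Char) (l : List Char) : (myDel o c l).length ≤ l.length := by
  induction l using myDel.induct o c with
  | case1 => simp [myDel]
  | case2 a => simp [myDel]
  | case3 a b r hab ih => simp [myDel, hab]; omega
  | case4 a b r hab ih =>
      simp only [List.length_cons] at ih
      simp [myDel, hab]; omega

theorem myDel_eq_of_length_eq (o c : Char) (l : List Char)
    (h : (myDel o c l).length = l.length) : myDel o c l = l := by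
  induction l using myDel.induct o c with
  | case1 => simp [myDel]
  | case2 a => simp [myDel]
  | case3 a b r hab ih =>
      exfalso
      have := length_myDel_le o c r
      simp [myDel, hab] at h; omega
  | case4 a b r hab ih =>
      simp [myDel, hab] at h ⊢
      exact ih h

theorem myDel_ne_of_infix (o c : Char) (l : List Char)
    (h : [o, c] <:+: l) : myDel o c l ≠ l := by
  induction l using myDel.induct o c with
  | case1 => simp at h
  | case2 a =>
      exfalso
      have := h.length_le; simp at this
  | case3 a b r hab ih =>
      obtain ⟨ha, hb⟩ := hab; subst ha; subst hb
      intro he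
      have h1 : (myDel a b r).length ≤ r.length := length_myDel_le a b r
      have : (myDel a b (a :: b :: r)).length = (a :: b :: r).length := by rw [he]
      simp [myDel] at this
      omega
  | case4 a b r hab ih =>
      rcases List.infix_cons_iff.mp h with hp | hi
      · rcases List.cons_prefix_cons.mp hp with ⟨ha, hp2⟩
        rcases List.cons_prefix_cons.mp hp2 with ⟨hb, _⟩
        exact absurd ⟨ha.symm, hb.symm⟩ hab
      · simp [myDel, hab]
        exact ih hi

theorem stepA_pair (o c : Char) (h : pairOK o c) (st : List Char) :
    stepA (stepA st o) c = st := by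
  rcases h with ⟨ho, hc⟩ | ⟨ho, hc⟩ | ⟨ho, hc⟩ <;> subst ho <;> subst hc <;>
    simp [stepA]

theorem foldl_stepA_myDel (o c : Char) (h : pairOK o c) (l : List Char) :
    ∀ st, (myDel o c l).foldl stepA st = l.foldl stepA st := by
  induction l using myDel.induct o c with
  | case1 => intro st; simp [myDel]
  | case2 a => intro st; simp [myDel]
  | case3 a b r hab ih =>
      obtain ⟨ha, hb⟩ := hab; subst ha; subst hb
      intro st
      have hd : myDel a b (a :: b :: r) = myDel a b r := by simp [myDel]
      rw [hd, ih st, List.foldl_cons, List.foldl_cons, stepA_pair a b h st]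
  | case4 a b r hab ih =>
      intro st
      simp only [myDel, if_neg hab, List.foldl_cons]
      exact ih _

theorem pairOK_paren : pairOK '(' ')' := Or.inl ⟨rfl, rfl⟩
theorem pairOK_brace : pairOK '{' '}' := Or.inr (Or.inl ⟨rfl, rfl⟩)
theorem pairOK_brack : pairOK '[' ']' := Or.inr (Or.inr ⟨rfl, rfl⟩)

theorem reduceStep_as_myDel (t : List Char) :
    reduceStep t = myDel '[' ']' (myDel '{' '}' (myDel '(' ')' t)) := by
  simp [reduceStep, replace_eq_myDel]

theorem foldl_stepA_reduceStep (t st : List Char) :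
    (reduceStep t).foldl stepA st = t.foldl stepA st := by
  rw [reduceStep_as_myDel,
    foldl_stepA_myDel _ _ pairOK_brack, foldl_stepA_myDel _ _ pairOK_brace,
    foldl_stepA_myDel _ _ pairOK_paren]

theorem reduceStep_eq_of_le (t : List Char) (hge : t.length ≤ (reduceStep t).length) :
    reduceStep t = t := by
  have la := length_myDel_le '(' ')' t
  have lb := length_myDel_le '{' '}' (myDel '(' ')' t)
  have lc := length_myDel_le '[' ']' (myDel '{' '}' (myDel '(' ')' t))
  rw [reduceStep_as_myDel] at hge ⊢
  have ha : myDel '(' ')' t = t := myDel_eq_of_length_eq _ _ _ (by omega)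
  rw [ha] at lb lc hge ⊢
  have hb : myDel '{' '}' t = t := myDel_eq_of_length_eq _ _ _ (by omega)
  rw [hb] at lc hge ⊢
  exact myDel_eq_of_length_eq _ _ _ (by omega)

theorem fix_dels (u : List Char) (h : reduceStep u = u) :
    myDel '(' ')' u = u ∧ myDel '{' '}' u = u ∧ myDel '[' ']' u = u := by
  have hge : u.length ≤ (reduceStep u).length := by rw [h]
  have la := length_myDel_le '(' ')' u
  have lb := length_myDel_le '{' '}' (myDel '(' ')' u)
  have lc := length_myDel_le '[' ']' (myDel '{' '}' (myDel '(' ')' u))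
  rw [reduceStep_as_myDel] at hge h
  have ha : myDel '(' ')' u = u := myDel_eq_of_length_eq _ _ _ (by omega)
  rw [ha] at lb lc hge h
  have hb : myDel '{' '}' u = u := myDel_eq_of_length_eq _ _ _ (by omega)
  rw [hb] at lc hge h
  exact ⟨ha, hb, h⟩

theorem reduceStep_eq_or_lt (t : List Char) :
    reduceStep t = t ∨ (reduceStep t).length < t.length := by
  rcases Nat.lt_or_ge (reduceStep t).length t.length with hl | hg
  · exact Or.inr hl
  · exact Or.inl (reduceStep_eq_of_le t hg)

theorem not_infix_of_fix (u : List Char) (h : reduceStep u = u) (o c : Char)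
    (hp : pairOK o c) : ¬ ([o, c] <:+: u) := by
  intro hi
  obtain ⟨ha, hb, hc⟩ := fix_dels u h
  rcases hp with ⟨ho, hc'⟩ | ⟨ho, hc'⟩ | ⟨ho, hc'⟩ <;> subst ho <;> subst hc'
  · exact myDel_ne_of_infix _ _ _ hi ha
  · exact myDel_ne_of_infix _ _ _ hi hb
  · exact myDel_ne_of_infix _ _ _ hi hc

theorem foldl_stepA_reduceLoop : ∀ (fuel : Nat) (t st : List Char),
    (reduceLoop fuel t).foldl stepA st = t.foldl stepA st := by
  intro fuel
  induction fuel with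
  | zero => intro t st; simp [reduceLoop]
  | succ k ih =>
      intro t st
      simp only [reduceLoop]
      by_cases h : reduceStep t = t
      · simp [h]
      · rw [if_neg h, ih (reduceStep t) st, foldl_stepA_reduceStep]

theorem reduceLoop_fix : ∀ (fuel : Nat) (t : List Char), t.length < fuel →
    reduceStep (reduceLoop fuel t) = reduceLoop fuel t := by
  intro fuel
  induction fuel with
  | zero => intro t h; omega
  | succ k ih =>
      intro t h
      simp only [reduceLoop]
      by_cases hf : reduceStep t = t
      · simp [hf]
      · rw [if_neg hf]
        apply ih
        rcases reduceStep_eq_or_lt t with he | hl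
        · exact absurd he hf
        · omega

theorem stack_empty_adj : ∀ (v st : List Char), v.foldl stepA st = [] →
    st.reverse ++ v = [] ∨ ∃ o c, pairOK o c ∧ [o, c] <:+: (st.reverse ++ v) := by
  intro v
  induction v with
  | nil =>
      intro st h
      simp at h
      subst h
      simp
  | cons ch rest ih =>
      intro st h
      simp only [List.foldl_cons] at h
      have hpush : stepA st ch = ch :: st →
          (st.reverse ++ ch :: rest = [] ∨
            ∃ o c, pairOK o c ∧ [o, c] <:+: (st.reverse ++ ch :: rest)) := by
        intro hs
        rw [hs] at h
        rcases ih (ch :: st) h with he | ⟨o, c', hp, hi⟩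
        · exact absurd he (by simp)
        · refine Or.inr ⟨o, c', hp, ?_⟩
          simpa [List.append_assoc] using hi
      by_cases hop : ch = '(' ∨ ch = '{' ∨ ch = '['
      · exact hpush (by simp only [stepA, if_pos hop])
      · match st with
        | [] => exact hpush (by simp only [stepA, if_neg hop])
        | top :: rest' =>
            by_cases hm : (ch = ')' ∧ top = '(') ∨ (ch = '}' ∧ top = '{') ∨ (ch = ']' ∧ top = '[')
            · refine Or.inr ⟨top, ch, ?_, ?_⟩
              · rcases hm with ⟨h1, h2⟩ | ⟨h1, h2⟩ | ⟨h1, h2⟩ <;> subst h1 <;> subst h2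
                · exact pairOK_paren
                · exact pairOK_brace
                · exact pairOK_brack
              · exact ⟨rest'.reverse, rest, by simp⟩
            · exact hpush (by simp only [stepA, if_neg hop, if_neg hm])

theorem valid_iff (t : List Char) :
    (reduceLoop (t.length + 1) t = [] ↔ t.foldl stepA [] = []) := by
  constructor
  · intro h
    have := foldl_stepA_reduceLoop (t.length + 1) t []
    rw [h] at this
    simpa using this.symm
  · intro h
    have hfold : (reduceLoop (t.length + 1) t).foldl stepA [] = [] := by
      rw [foldl_stepA_reduceLoop]; exact h
    have hfix := reduceLoop_fix (t.length + 1) t (by omega)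
    rcases stack_empty_adj (reduceLoop (t.length + 1) t) [] hfold with he | ⟨o, c', hp, hi⟩
    · simpa using he
    · exfalso
      exact not_infix_of_fix _ hfix o c' hp (by simpa using hi)

theorem outer (l : List Char) : ∀ (k a : Nat) (ans : Int), a + k = l.length →
    ((PySem.List.pyRange (a : Int) (l.length : Int) 1).foldl (fun (st : Int × List Char) _ =>
      let string := st.2
      let stack := (PySem.List.pyRange 0 (l.length : Int) 1).foldl
        (fun stack i => stepA stack (PySem.List.pyGetD string i ' ')) []
      let answer := if stack = [] then st.1 + 1 else st.1
      let string' := match PySem.List.pop? string 0 with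
        | some (v, rest) => rest ++ [v]
        | none => string
      (answer, string')) (ans, l.drop a ++ l.take a)).1
    = (PySem.List.pyRange (a : Int) (l.length : Int) 1).foldl (fun (answer : Int) r =>
      let t := PySem.List.slice l (some r) none ++ PySem.List.slice l none (some r)
      if reduceLoop (t.length + 1) t = [] then answer + 1 else answer) ans := by
  intro k
  induction k with
  | zero =>
      intro a ans ha
      have hnil : PySem.List.pyRange (a : Int) (l.length : Int) 1 = [] :=
        PySem.List.pyRange_one_eq_nil (by omega)
      rw [hnil]
      rfl
  | succ k ih =>
      intro a ans ha
      have halt : a < l.length := by omega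
      rw [PySem.List.pyRange_one_cons (a := (a : Int)) (b := (l.length : Int)) (by exact_mod_cast halt)]
      simp only [List.foldl_cons]
      have hw : (l.drop a ++ l.take a).length = l.length := by
        simp [List.length_drop, List.length_take]; omega
      -- the inner index loop is the fold over the rotated string
      have hstack : (PySem.List.pyRange 0 (l.length : Int) 1).foldl
          (fun stack i => stepA stack (PySem.List.pyGetD (l.drop a ++ l.take a) i ' ')) []
          = (l.drop a ++ l.take a).foldl stepA [] := by
        rw [show ((l.length : Nat) : Int) = (((l.drop a ++ l.take a).length : Nat) : Int) by
          rw [hw]]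
        exact PySem.List.foldl_pyRange_zero_pyGetD' (l.drop a ++ l.take a) ' ' stepA []
      -- B's slice at r = a is the same rotated string
      have hslice : PySem.List.slice l (some (a : Int)) none ++ PySem.List.slice l none (some (a : Int))
          = l.drop a ++ l.take a := by
        rw [PySem.List.slice_from_natCast, PySem.List.slice_to_natCast]
      -- the two validity tests agree
      have hcond : (reduceLoop ((l.drop a ++ l.take a).length + 1) (l.drop a ++ l.take a) = []) ↔
          ((l.drop a ++ l.take a).foldl stepA [] = []) := valid_iff _
      -- the rotation step
      have hrot : (match PySem.List.pop? (l.drop a ++ l.take a) 0 with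
          | some (v, rest) => rest ++ [v]
          | none => l.drop a ++ l.take a) = l.drop (a + 1) ++ l.take (a + 1) := by
        rw [List.drop_eq_getElem_cons halt]
        simp only [List.cons_append, PySem.List.pop?_zero_cons]
        rw [List.take_succ]
        simp [List.getElem?_eq_getElem halt]
      rw [hstack, hslice, hrot]
      by_cases hv : (l.drop a ++ l.take a).foldl stepA [] = []
      · rw [if_pos hv, if_pos (hcond.mpr hv)]
        have := ih (a + 1) (ans + 1) (by omega)
        rw [show ((a : Int) + 1) = (((a + 1 : Nat)) : Int) by push_cast; ring]
        exact this
      · rw [if_neg hv, if_neg (fun hc => hv (hcond.mp hc))]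
        have := ih (a + 1) ans (by omega)
        rw [show ((a : Int) + 1) = (((a + 1 : Nat)) : Int) by push_cast; ring]
        exact this


theorem main_eq (s : String) : solution s = solution_alt s := by
  unfold solution solution_alt
  have h := outer s.toList s.toList.length 0 0 (by omega)
  simpa using h

-- ===== VERDICT (by name: the statement is the Claim_ definition above) =====
theorem solution_spec : Claim_equal_solution := by
  intro s _
  unfold Spec_solution
  exact main_eq s
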